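-- pv_equiv track=rewrite | github.com/skyoxu/rouge | scripts/python/generate_overlay_08_audit.py | parse_title_status
-- ===== SOURCE A (Python) =====
-- def parse_title_status(fm: str) -> tuple[str, str]:
--     title = ""
--     status = ""
--     for line in fm.splitlines():
--         if line.startswith("Title:"):
--             title = line.split(":", 1)[1].strip()
--         if line.startswith("Status:"):
--             status = line.split(":", 1)[1].strip()
--     return title, status
-- ===== SOURCE B (Python) =====
-- def parse_title_status(fm: str) -> tuple[str, str]:
--     lines = fm.splitlines()
--
--     def last_field(prefix: str) -> str:
--         for line in reversed(lines):
--             if line.startswith(prefix):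
--                 return line.split(":", 1)[1].strip()
--         return ""
--
--     return last_field("Title:"), last_field("Status:")
-- ===== Notes on version B (the rewrite author's own statement) =====
-- stated objective: alternative
-- what changed: Replaced the single forward pass that carries both accumulators by two independent backward searches over reversed(lines) with early exit at the last matching line, exploiting last-write-wins.
import Mathlib
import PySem

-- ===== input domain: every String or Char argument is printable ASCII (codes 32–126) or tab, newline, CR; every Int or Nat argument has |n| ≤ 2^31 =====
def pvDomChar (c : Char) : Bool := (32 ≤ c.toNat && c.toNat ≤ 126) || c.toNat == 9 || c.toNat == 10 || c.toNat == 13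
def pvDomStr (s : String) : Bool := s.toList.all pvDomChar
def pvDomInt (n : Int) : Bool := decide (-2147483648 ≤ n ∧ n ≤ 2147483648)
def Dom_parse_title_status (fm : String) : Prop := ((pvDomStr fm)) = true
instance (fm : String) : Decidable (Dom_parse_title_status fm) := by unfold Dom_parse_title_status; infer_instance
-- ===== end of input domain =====

-- B replaces the single forward pass that carries both accumulators by two independent
-- backward searches (reversed lines, early exit at the last matching line).

-- ===== PORT A =====
-- literal port of A: fold over splitlines carrying (title, status); the [1] index is a
-- match on pyGet? (none = IndexError, unreachable under the startswith guard).
def parse_title_status (fm : String) : String × String :=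
  (PySem.Str.splitlines fm).foldl
    (fun (ts : String × String) line =>
      let ts1 :=
        if PySem.Str.startswith line "Title:" then
          match PySem.Str.splitMax? line ":" 1 with
          | some parts =>
            match PySem.List.pyGet? parts 1 with
            | some v => (PySem.Str.strip v, ts.2)
            | none => ts
          | none => ts
        else ts
      if PySem.Str.startswith line "Status:" then
        match PySem.Str.splitMax? line ":" 1 with
        | some parts =>
          match PySem.List.pyGet? parts 1 with
          | some v => (ts1.1, PySem.Str.strip v)
          | none => ts1
        | none => ts1
      else ts1)
    ("", "")

-- ===== PORT B =====
-- literal port of B's inner loop `for line in reversed(lines): if startswith: return …`;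
-- the none fallbacks "" are unreachable (the matched prefix guarantees a colon, so the
-- split has a second part where Python's [1] cannot raise).
def pvLastFieldGo (p : String) : List String → String
  | [] => ""
  | line :: rest =>
    if PySem.Str.startswith line p then
      match PySem.Str.splitMax? line ":" 1 with
      | some parts =>
        match PySem.List.pyGet? parts 1 with
        | some v => PySem.Str.strip v
        | none => ""
      | none => ""
    else pvLastFieldGo p rest

def parse_title_status_alt (fm : String) : String × String :=
  let lines := PySem.Str.splitlines fm
  (pvLastFieldGo "Title:" lines.reverse, pvLastFieldGo "Status:" lines.reverse)

-- ===== PRECONDITION & SPEC =====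
def Spec_parse_title_status (fm : String) (out : String × String) : Prop := out = parse_title_status_alt fm
instance (fm : String) (out : String × String) : Decidable (Spec_parse_title_status fm out) := by unfold Spec_parse_title_status; infer_instance

-- ===== CLAIM (what is proved, stated in full; the proofs are below) =====
def Claim_equal_parse_title_status : Prop := ∀ (fm : String), Dom_parse_title_status fm → Spec_parse_title_status fm (parse_title_status fm)

-- ===== LEMMAS AND PROOFS =====

-- A's per-line step, named for the proofs (identical to the lambda in the port)
def pvStepA (ts : String × String) (line : String) : String × String :=
  let ts1 :=
    if PySem.Str.startswith line "Title:" then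
      match PySem.Str.splitMax? line ":" 1 with
      | some parts =>
        match PySem.List.pyGet? parts 1 with
        | some v => (PySem.Str.strip v, ts.2)
        | none => ts
      | none => ts
    else ts
  if PySem.Str.startswith line "Status:" then
    match PySem.Str.splitMax? line ":" 1 with
    | some parts =>
      match PySem.List.pyGet? parts 1 with
      | some v => (ts1.1, PySem.Str.strip v)
      | none => ts1
    | none => ts1
  else ts1

-- one field's accumulator update, with fallback t
def pvUpd (p : String) (t : String) (line : String) : String :=
  if PySem.Str.startswith line p then
    match PySem.Str.splitMax? line ":" 1 with
    | some parts =>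
      match PySem.List.pyGet? parts 1 with
      | some v => PySem.Str.strip v
      | none => t
    | none => t
  else t

def pvKey (line : String) : String := String.ofList (line.toList.takeWhile (· ≠ ':'))
def pvVal (line : String) : String := String.ofList ((line.toList.dropWhile (· ≠ ':')).tail)

-- splitOnMax.go with maxsplit exhausted just flushes the rest
theorem pvGo_zero (fuel : Nat) (l cur : List Char) (acc : List (List Char)) :
    PySem.Chars.splitOnMax.go [':'] fuel 0 l cur acc = acc.reverse ++ [cur.reverse ++ l] := by
  cases fuel with
  | zero => simp [PySem.Chars.splitOnMax.go]
  | succ f => cases l with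
    | nil => simp [PySem.Chars.splitOnMax.go]
    | cons c rest => simp [PySem.Chars.splitOnMax.go]

-- characterisation of split(":", 1) at the char level
theorem pvGo_one (l : List Char) : ∀ (fuel : Nat), l.length < fuel → ∀ (cur : List Char) (acc : List (List Char)),
    PySem.Chars.splitOnMax.go [':'] fuel 1 l cur acc =
      if ':' ∈ l then
        acc.reverse ++ [cur.reverse ++ l.takeWhile (· ≠ ':'), (l.dropWhile (· ≠ ':')).tail]
      else acc.reverse ++ [cur.reverse ++ l] := by
  induction l with
  | nil =>
    intro fuel hf cur acc
    cases fuel with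
    | zero => omega
    | succ f => simp [PySem.Chars.splitOnMax.go]
  | cons c rest ih =>
    intro fuel hf cur acc
    cases fuel with
    | zero => omega
    | succ f =>
      by_cases hc : c = ':'
      · subst hc
        have hpre : [':'].isPrefixOf (':' :: rest) = true := by simp [List.isPrefixOf]
        simp only [PySem.Chars.splitOnMax.go, hpre]
        rw [pvGo_zero]
        simp [List.takeWhile, List.dropWhile]
      · have hpre : [':'].isPrefixOf (c :: rest) = false := by
          simp [List.isPrefixOf]; exact Ne.symm hc
        simp only [PySem.Chars.splitOnMax.go, hpre]
        have : rest.length < f := by simp at hf; omega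
        rw [ih f this (c :: cur) acc]
        by_cases hm : ':' ∈ rest
        · simp [hm, hc, Ne.symm hc, List.takeWhile, List.dropWhile]
        · simp [hm, Ne.symm hc]

theorem pvSplit_mem (line : String) (h : ':' ∈ line.toList) :
    PySem.Str.splitMax? line ":" 1 = some [pvKey line, pvVal line] := by
  have hgo := pvGo_one line.toList (line.toList.length + 1) (by omega) [] []
  simp only [if_pos h, List.reverse_nil, List.nil_append] at hgo
  simp only [PySem.Str.splitMax?, PySem.Chars.splitMax?, PySem.Chars.splitOnMax,
    show (":".toList) = [':'] from rfl, show ((1 : Int) < 0) = False from by simp,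
    if_false, List.isEmpty_cons, Bool.false_eq_true, show ((1 : Int)).toNat = 1 from rfl, hgo]
  simp [pvKey, pvVal]

-- a line starting with a prefix that contains ':' itself contains ':'
theorem pvStarts_colon (line p : String) (hp : ':' ∈ p.toList)
    (h : PySem.Str.startswith line p = true) : ':' ∈ line.toList := by
  rw [show PySem.Str.startswith line p = PySem.Chars.startswith line.toList p.toList from rfl,
      PySem.Chars.startswith_iff] at h
  exact h.mem hp

-- under the prefix guard the extracted value is independent of the fallback
theorem pvExtract (line p : String) (hp : ':' ∈ p.toList)
    (h : PySem.Str.startswith line p = true) (x : String) :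
    (match PySem.Str.splitMax? line ":" 1 with
     | some parts =>
       match PySem.List.pyGet? parts 1 with
       | some v => PySem.Str.strip v
       | none => x
     | none => x) = PySem.Str.strip (pvVal line) := by
  rw [pvSplit_mem line (pvStarts_colon line p hp h)]
  simp [PySem.List.pyGet?, PySem.List.pyIdx?]

-- A's step is the pair of the two independent field updates
theorem pvStepA_pair (ts : String × String) (line : String) :
    pvStepA ts line = (pvUpd "Title:" ts.1 line, pvUpd "Status:" ts.2 line) := by
  obtain ⟨t, s⟩ := ts
  unfold pvStepA pvUpd
  by_cases h1 : PySem.Str.startswith line "Title:" = true <;>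
  by_cases h2 : PySem.Str.startswith line "Status:" = true <;>
    simp only [h1, h2, if_true, Bool.false_eq_true, if_false] <;>
    cases hsp : PySem.Str.splitMax? line ":" 1 with
    | none => rfl
    | some parts => cases hg : PySem.List.pyGet? parts 1 <;> simp only [hg]

theorem pvFoldl_pair (ls : List String) : ∀ (t s : String),
    ls.foldl pvStepA (t, s) =
      (ls.foldl (pvUpd "Title:") t, ls.foldl (pvUpd "Status:") s) := by
  induction ls with
  | nil => intro t s; rfl
  | cons line rest ih =>
    intro t s
    simp only [List.foldl_cons, pvStepA_pair]
    exact ih _ _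

-- the backward search distributes over append: a match in the front part wins
theorem pvGo_append (p : String) (xs ys : List String) :
    pvLastFieldGo p (xs ++ ys) =
      if xs.any (fun l => PySem.Str.startswith l p) then pvLastFieldGo p xs
      else pvLastFieldGo p ys := by
  induction xs with
  | nil => simp
  | cons x xs ih =>
    simp only [List.cons_append, List.any_cons]
    by_cases hx : PySem.Str.startswith x p = true
    · simp only [pvLastFieldGo, hx, if_true, Bool.true_or]
    · rw [Bool.not_eq_true] at hx
      simp only [pvLastFieldGo, hx, Bool.false_eq_true, if_false, Bool.false_or]
      exact ih

-- the forward fold of one field equals the backward search, with the initial value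
-- as the no-match result
theorem pvFoldl_upd_eq (p : String) (hp : ':' ∈ p.toList) (ls : List String) : ∀ (t : String),
    ls.foldl (pvUpd p) t =
      if ls.any (fun l => PySem.Str.startswith l p) then pvLastFieldGo p ls.reverse
      else t := by
  induction ls with
  | nil => intro t; simp
  | cons line rest ih =>
    intro t
    rw [List.foldl_cons, ih (pvUpd p t line), List.reverse_cons, pvGo_append, List.any_reverse,
        List.any_cons]
    by_cases hr : (rest.any fun l => PySem.Str.startswith l p) = true
    · rw [if_pos hr, hr, Bool.or_true, if_pos rfl, if_pos rfl]
    · rw [Bool.not_eq_true] at hr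
      rw [hr, Bool.or_false]
      simp only [Bool.false_eq_true, if_false]
      by_cases hl : PySem.Str.startswith line p = true
      · rw [if_pos hl]
        simp only [pvUpd, pvLastFieldGo, hl, if_true]
        rw [pvExtract line p hp hl t, pvExtract line p hp hl ""]
      · rw [Bool.not_eq_true] at hl
        simp only [pvUpd, hl, Bool.false_eq_true, if_false]

-- a list without a match makes the backward search return ""
theorem pvGo_none (p : String) (ls : List String)
    (h : ls.any (fun l => PySem.Str.startswith l p) = false) :
    pvLastFieldGo p ls.reverse = "" := by
  induction ls with
  | nil => rfl
  | cons line rest ih =>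
    simp only [List.any_cons, Bool.or_eq_false_iff] at h
    simp only [List.reverse_cons, pvGo_append, List.any_reverse, h.2, Bool.false_eq_true,
      if_false, pvLastFieldGo, h.1, ih h.2]

-- ===== VERDICT (by name: the statement is the Claim_ definition above) =====
theorem parse_title_status_spec : Claim_equal_parse_title_status := by
  intro fm _
  unfold Spec_parse_title_status parse_title_status parse_title_status_alt
  show (PySem.Str.splitlines fm).foldl pvStepA ("", "") = _
  rw [pvFoldl_pair]
  rw [pvFoldl_upd_eq "Title:" (by decide), pvFoldl_upd_eq "Status:" (by decide)]
  show _ = (pvLastFieldGo "Title:" (PySem.Str.splitlines fm).reverse,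
            pvLastFieldGo "Status:" (PySem.Str.splitlines fm).reverse)
  rw [Prod.mk.injEq]
  constructor <;> split <;> first
    | rfl
    | (rename_i h; exact (pvGo_none _ _ (by simpa using h)).symm)
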